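-- pv_equiv track=rewrite | github.com/26pratyush/Swap-and-Step-Cipher | swap&step.py | custom_encrypt
-- ===== SOURCE A (Python) =====
-- def shift_char(c, shift):
--     if 'a' <= c <= 'z':  # Handle lowercase letters
--         return chr((ord(c) - ord('a') + shift) % 26 + ord('a'))
--     elif 'A' <= c <= 'Z':  # Handle uppercase letters
--         return chr((ord(c) - ord('A') + shift) % 26 + ord('A'))
--     else:
--         return c
--
-- def custom_encrypt(text):
--     space_positions = [i for i, char in enumerate(text) if char == ' ']
--     text = text.replace(" ", "")
--     result = []
--     pairs = [text[i:i+2] for i in range(0, len(text), 2)]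
--
--     for i, pair in enumerate(pairs):
--         if len(pair) == 2:
--             swapped = pair[1] + pair[0]
--             for j, char in enumerate(swapped):
--                 new_position = 2 * i + j
--                 if new_position % 2 == 0:
--                     result.append(shift_char(char, 1))
--                 else:
--                     result.append(shift_char(char, -1))
--         else:
--             last_char = pair[0]
--             new_position = 2 * i
--             if new_position % 2 == 0:
--                 result.append(shift_char(last_char, 1))
--             else:
--                 result.append(shift_char(last_char, -1))
--
--     encrypted_text = ''.join(result)
--     return encrypted_text, space_positions
-- ===== SOURCE B (Python) =====
-- _LOW = 'abcdefghijklmnopqrstuvwxyz'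
-- _UP = _LOW.upper()
--
-- def _shift(c, d):
--     i = _LOW.find(c)
--     if i >= 0:
--         return _LOW[(i + d) % 26]
--     i = _UP.find(c)
--     if i >= 0:
--         return _UP[(i + d) % 26]
--     return c
--
-- def custom_encrypt(text):
--     # single fused pass: record spaces, and hold one non-space char pending;
--     # when a second arrives, emit it shifted +1 followed by the held one shifted -1
--     spaces = []
--     out = []
--     pending = None
--     for i, c in enumerate(text):
--         if c == ' ':
--             spaces.append(i)
--         elif pending is None:
--             pending = c
--         else:
--             out.append(_shift(c, 1))
--             out.append(_shift(pending, -1))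
--             pending = None
--     if pending is not None:
--         out.append(_shift(pending, 1))
--     return ''.join(out), spaces
-- ===== Notes on version B (the rewrite author's own statement) =====
-- stated objective: alternative
-- what changed: A runs staged passes (collect spaces, strip spaces into a new string, cut it into two-char slices, then re-derive each output position's parity to pick +1/-1 ord-arithmetic shifts); B is a single fused pass over the original string with a one-character pending buffer: spaces are recorded and pairs are swapped-and-shifted on the fly as the second char of a pair arrives, with no stripped string, no pairs list and no parity bookkeeping, and the shift done by alphabet-table lookup.
import Mathlib
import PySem

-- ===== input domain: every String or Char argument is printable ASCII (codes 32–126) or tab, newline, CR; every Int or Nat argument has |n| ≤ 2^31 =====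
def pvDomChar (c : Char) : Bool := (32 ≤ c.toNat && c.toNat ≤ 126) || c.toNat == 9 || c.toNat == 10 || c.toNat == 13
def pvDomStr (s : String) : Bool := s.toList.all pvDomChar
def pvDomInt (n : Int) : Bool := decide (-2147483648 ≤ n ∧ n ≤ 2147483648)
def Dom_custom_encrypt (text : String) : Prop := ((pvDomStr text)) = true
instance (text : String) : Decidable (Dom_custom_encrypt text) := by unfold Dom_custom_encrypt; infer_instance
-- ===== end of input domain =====

-- B replaces A's staged passes (space scan, space-stripped copy, two-char slicing, parity-driven
-- per-character shifts) with one fused pass over the original string holding a one-char pending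
-- buffer, shifting by alphabet-table lookup (alternative decomposition, same cost).

-- ===== PORT A =====
-- shift_char
def pvShift (c : Char) (shift : Int) : Char :=
  if 'a' ≤ c ∧ c ≤ 'z' then Char.ofNat ((PySem.Int.mod ((c.toNat : Int) - 97 + shift) 26) + 97).toNat
  else if 'A' ≤ c ∧ c ≤ 'Z' then Char.ofNat ((PySem.Int.mod ((c.toNat : Int) - 65 + shift) 26) + 65).toNat
  else c

def custom_encrypt (text : String) : String × List Int :=
  let spaces : List Int := (PySem.List.enumerate text.toList 0).foldl
    (fun acc p => if p.2 = ' ' then acc ++ [p.1] else acc) []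
  let s := PySem.Chars.replace text.toList [' '] []
  let pairs := (PySem.List.pyRange 0 (s.length : Int) 2).map
    (fun i => PySem.List.slice s (some i) (some (i + 2)))
  let result := (PySem.List.enumerate pairs 0).foldl (fun acc p =>
    if p.2.length = 2 then
      let swapped := [PySem.List.pyGetD p.2 1 ' ', PySem.List.pyGetD p.2 0 ' ']
      (PySem.List.enumerate swapped 0).foldl (fun acc2 q =>
        if PySem.Int.mod (2 * p.1 + q.1) 2 = 0 then acc2 ++ [pvShift q.2 1]
        else acc2 ++ [pvShift q.2 (-1)]) acc
    else
      if PySem.Int.mod (2 * p.1) 2 = 0 then acc ++ [pvShift (PySem.List.pyGetD p.2 0 ' ') 1]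
      else acc ++ [pvShift (PySem.List.pyGetD p.2 0 ' ') (-1)]) []
  (String.ofList result, spaces)

-- ===== PORT B =====
def pvLow : List Char := "abcdefghijklmnopqrstuvwxyz".toList
def pvUp : List Char := PySem.Chars.upper pvLow
-- _shift: alphabet-table lookup, _LOW.find(c) / _UP.find(c) then index (i+d) % 26
def pvSh (c : Char) (d : Int) : Char :=
  let i := PySem.Chars.find pvLow [c]
  if i ≥ 0 then PySem.List.pyGetD pvLow (PySem.Int.mod (i + d) 26) ' '
  else
    let i2 := PySem.Chars.find pvUp [c]
    if i2 ≥ 0 then PySem.List.pyGetD pvUp (PySem.Int.mod (i2 + d) 26) ' '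
    else c
-- one iteration of Source B's loop: state (spaces, out, pending)
def pvBStep (st : List Int × List Char × Option Char) (p : Int × Char) :
    List Int × List Char × Option Char :=
  if p.2 = ' ' then (st.1 ++ [p.1], st.2.1, st.2.2)
  else match st.2.2 with
    | none => (st.1, st.2.1, some p.2)
    | some q => (st.1, st.2.1 ++ [pvSh p.2 1, pvSh q (-1)], none)
-- Source B's trailing 'if pending is not None: out.append(_shift(pending, 1))'
def pvFin : List Char × Option Char → List Char
  | (out, some q) => out ++ [pvSh q 1]
  | (out, none) => out

def custom_encrypt_alt (text : String) : String × List Int :=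
  let st := (PySem.List.enumerate text.toList 0).foldl pvBStep ([], [], none)
  (String.ofList (pvFin st.2), st.1)

-- ===== PRECONDITION & SPEC =====
def Spec_custom_encrypt (text : String) (out : String × List Int) : Prop := out = custom_encrypt_alt text
instance (text : String) (out : String × List Int) : Decidable (Spec_custom_encrypt text out) := by unfold Spec_custom_encrypt; infer_instance

-- ===== CLAIM (what is proved, stated in full; the proofs are below) =====
def Claim_equal_custom_encrypt : Prop := ∀ (text : String), Dom_custom_encrypt text → Spec_custom_encrypt text (custom_encrypt text)

-- ===== LEMMAS AND PROOFS =====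

-- the common intended result: swap within each pair, +1 shift at even result positions, -1 at odd
def pvG : List Char → List Char
  | [] => []
  | [c] => [pvShift c 1]
  | a :: b :: t => pvShift b 1 :: pvShift a (-1) :: pvG t

-- the same, written with B's table-lookup shift
def pvGB : List Char → List Char
  | [] => []
  | [c] => [pvSh c 1]
  | a :: b :: t => pvSh b 1 :: pvSh a (-1) :: pvGB t

-- B's pair consumption, restated structurally on the non-space characters
def pvPairsFold : List Char → List Char × Option Char → List Char × Option Char
  | [], st => st
  | c :: t, (out, none) => pvPairsFold t (out, some c)
  | c :: t, (out, some q) => pvPairsFold t (out ++ [pvSh c 1, pvSh q (-1)], none)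

set_option maxRecDepth 8192 in
theorem pv_perchar_plus : ∀ n : Fin 127,
    pvSh (Char.ofNat n.val) 1 = pvShift (Char.ofNat n.val) 1 := by decide

set_option maxRecDepth 8192 in
theorem pv_perchar_minus : ∀ n : Fin 127,
    pvSh (Char.ofNat n.val) (-1) = pvShift (Char.ofNat n.val) (-1) := by decide

theorem pv_sh_plus (c : Char) (h : c.toNat ≤ 126) : pvSh c 1 = pvShift c 1 := by
  have := pv_perchar_plus ⟨c.toNat, by omega⟩
  simpa [Char.ofNat_toNat] using this

theorem pv_sh_minus (c : Char) (h : c.toNat ≤ 126) : pvSh c (-1) = pvShift c (-1) := by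
  have := pv_perchar_minus ⟨c.toNat, by omega⟩
  simpa [Char.ofNat_toNat] using this

theorem pv_replace_go (fuel : Nat) : ∀ (l acc : List Char), l.length ≤ fuel →
    PySem.Chars.replace.go [' '] [] fuel l acc = acc.reverse ++ l.filter (fun c => c ≠ ' ') := by
  induction fuel with
  | zero =>
    intro l acc h
    have : l = [] := by cases l <;> simp_all
    subst this
    simp [PySem.Chars.replace.go]
  | succ n ih =>
    intro l acc h
    cases l with
    | nil => simp [PySem.Chars.replace.go]
    | cons c t =>
      by_cases hc : c = ' '
      · subst hc
        rw [show PySem.Chars.replace.go [' '] [] (n+1) (' ' :: t) acc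
              = PySem.Chars.replace.go [' '] [] n t acc from by
            simp [PySem.Chars.replace.go, List.isPrefixOf]]
        rw [ih t acc (by simpa using h)]
        simp
      · rw [show PySem.Chars.replace.go [' '] [] (n+1) (c :: t) acc
              = PySem.Chars.replace.go [' '] [] n t (c :: acc) from by
            simp [PySem.Chars.replace.go, List.isPrefixOf, Ne.symm hc]]
        rw [ih t (c :: acc) (by simpa using h)]
        simp [hc]

theorem pv_replace_filter (l : List Char) :
    PySem.Chars.replace l [' '] [] = l.filter (fun c => c ≠ ' ') := by
  have := pv_replace_go l.length l [] le_rfl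
  simpa [PySem.Chars.replace] using this

theorem pv_slice_pair {α : Type} (xs : List α) (j : Nat) :
    PySem.List.slice xs (some (j : Int)) (some ((j : Int) + 2)) = (xs.drop j).take 2 := by
  have h := PySem.List.slice_natCast_add xs j 2
  norm_num at h
  exact h

-- A's list of two-character slices, decomposed structurally
theorem pv_pairs_one (a : Char) :
    (PySem.List.pyRange 0 (([a] : List Char).length : Int) 2).map
      (fun i => PySem.List.slice [a] (some i) (some (i + 2))) = [[a]] := by
  norm_num [PySem.List.pyRange_of_pos (0 : Int) 1 (by norm_num : (0 : Int) < 2)]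
  have := pv_slice_pair [a] 0
  norm_num at this
  exact this

theorem pv_pairs_cons₂ (a b : Char) (t : List Char) :
    (PySem.List.pyRange 0 ((a :: b :: t).length : Int) 2).map
      (fun i => PySem.List.slice (a :: b :: t) (some i) (some (i + 2)))
    = [a, b] :: (PySem.List.pyRange 0 (t.length : Int) 2).map
      (fun i => PySem.List.slice t (some i) (some (i + 2))) := by
  rw [PySem.List.pyRange_of_pos 0 ((a :: b :: t).length : Int) (by norm_num : (0 : Int) < 2),
      PySem.List.pyRange_of_pos 0 (t.length : Int) (by norm_num : (0 : Int) < 2)]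
  have h1 : (if (0 : Int) < ((a :: b :: t).length : Int) then ((((a :: b :: t).length : Int) - 0 + 2 - 1) / 2).toNat else 0)
      = ((if (0 : Int) < (t.length : Int) then (((t.length : Int) - 0 + 2 - 1) / 2).toNat else 0)) + 1 := by
    simp only [List.length_cons]
    split <;> split <;> push_cast <;> omega
  rw [h1, List.range_succ_eq_map]
  simp only [List.map_cons, List.map_map]
  have hhd : PySem.List.slice (a :: b :: t) (some (0 + 2 * ((0 : Nat) : Int))) (some (0 + 2 * ((0 : Nat) : Int) + 2)) = [a, b] := by
    have := pv_slice_pair (a :: b :: t) 0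
    norm_num at this ⊢
    exact this
  rw [hhd]
  congr 1
  apply List.map_congr_left
  intro k _
  show PySem.List.slice (a :: b :: t) (some (0 + 2 * ((k + 1 : Nat) : Int))) (some (0 + 2 * ((k + 1 : Nat) : Int) + 2))
      = PySem.List.slice t (some (0 + 2 * (k : Int))) (some (0 + 2 * (k : Int) + 2))
  have e1 : (0 + 2 * ((k + 1 : Nat) : Int)) = ((2 * k + 2 : Nat) : Int) := by push_cast; ring
  have e2 : (0 + 2 * (k : Int)) = ((2 * k : Nat) : Int) := by push_cast; ring
  rw [e1, e2, pv_slice_pair, pv_slice_pair]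
  rw [show 2 * k + 2 = (2 * k) + 1 + 1 by omega]
  rw [List.drop_succ_cons, List.drop_succ_cons]

theorem pv_foldl_init_congr {α β : Type} (f : β → α → β) (l : List α) {a b : β} (h : a = b) :
    List.foldl f a l = List.foldl f b l := by rw [h]

-- A's main loop computes pvG of the despaced string
theorem pv_A_fold : ∀ (t : List Char) (i : Int) (acc : List Char),
    (PySem.List.enumerate ((PySem.List.pyRange 0 (t.length : Int) 2).map
      (fun j => PySem.List.slice t (some j) (some (j + 2)))) i).foldl
      (fun acc p =>
        if p.2.length = 2 then
          let swapped := [PySem.List.pyGetD p.2 1 ' ', PySem.List.pyGetD p.2 0 ' ']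
          (PySem.List.enumerate swapped 0).foldl (fun acc2 q =>
            if PySem.Int.mod (2 * p.1 + q.1) 2 = 0 then acc2 ++ [pvShift q.2 1]
            else acc2 ++ [pvShift q.2 (-1)]) acc
        else
          if PySem.Int.mod (2 * p.1) 2 = 0 then acc ++ [pvShift (PySem.List.pyGetD p.2 0 ' ') 1]
          else acc ++ [pvShift (PySem.List.pyGetD p.2 0 ' ') (-1)]) acc
    = acc ++ pvG t := by
  intro t
  induction t using pvG.induct with
  | case1 =>
    intro i acc
    norm_num [PySem.List.pyRange_of_pos (0 : Int) 0 (by norm_num : (0 : Int) < 2), pvG,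
      PySem.List.enumerate_nil]
  | case2 a =>
    intro i acc
    rw [pv_pairs_one]
    rw [PySem.List.enumerate_cons, PySem.List.enumerate_nil]
    simp [pvG]
  | case3 a b t ih =>
    intro i acc
    rw [pv_pairs_cons₂, PySem.List.enumerate_cons, List.foldl_cons]
    have hm0 : PySem.Int.mod (2 * i + 0) 2 = 0 := by
      rw [PySem.Int.mod_eq_emod_of_pos (by norm_num)]; omega
    have hm1 : ¬ PySem.Int.mod (2 * i + 1) 2 = 0 := by
      rw [PySem.Int.mod_eq_emod_of_pos (by norm_num)]; omega
    refine Eq.trans (Eq.trans (pv_foldl_init_congr _ _ ?_)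
      (ih (i + 1) (acc ++ [pvShift b 1, pvShift a (-1)]))) ?_
    · norm_num [PySem.List.enumerate_cons, PySem.List.enumerate_nil, PySem.List.pyGetD_zero_cons,
        hm0, hm1, PySem.List.pyGetD, PySem.List.pyIdx?]
    · simp [pvG]

-- B's fused pass = A's space scan paired with the structural pair consumption of the non-spaces
theorem pv_B_fold : ∀ (t : List Char) (i : Int) (sp : List Int) (out : List Char) (pd : Option Char),
    (PySem.List.enumerate t i).foldl pvBStep (sp, out, pd)
    = ((PySem.List.enumerate t i).foldl (fun acc p => if p.2 = ' ' then acc ++ [p.1] else acc) sp,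
       pvPairsFold (t.filter (fun c => c ≠ ' ')) (out, pd)) := by
  intro t
  induction t with
  | nil => intro i sp out pd; simp [PySem.List.enumerate_nil, pvPairsFold]
  | cons c t ih =>
    intro i sp out pd
    rw [PySem.List.enumerate_cons, List.foldl_cons, List.foldl_cons]
    by_cases hc : c = ' '
    · subst hc
      rw [show pvBStep (sp, out, pd) (i, ' ') = (sp ++ [i], out, pd) from by
        simp [pvBStep]]
      rw [ih (i + 1) (sp ++ [i]) out pd]
      simp
    · have hf : List.filter (fun c => decide (c ≠ ' ')) (c :: t)
          = c :: List.filter (fun c => decide (c ≠ ' ')) t := by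
        simp [hc]
      cases pd with
      | none =>
        rw [show pvBStep (sp, out, none) (i, c) = (sp, out, some c) from by
          simp [pvBStep, hc]]
        rw [if_neg hc, ih (i + 1) sp out (some c)]
        simp only [hf, pvPairsFold]
      | some q =>
        rw [show pvBStep (sp, out, some q) (i, c) = (sp, out ++ [pvSh c 1, pvSh q (-1)], none) from by
          simp [pvBStep, hc]]
        rw [if_neg hc, ih (i + 1) sp (out ++ [pvSh c 1, pvSh q (-1)]) none]
        simp only [hf, pvPairsFold]

theorem pv_finalize : ∀ (l : List Char) (out : List Char),
    pvFin (pvPairsFold l (out, none)) = out ++ pvGB l := by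
  intro l
  induction l using pvGB.induct with
  | case1 => intro out; simp [pvPairsFold, pvFin, pvGB]
  | case2 a => intro out; simp [pvPairsFold, pvFin, pvGB]
  | case3 a b t ih =>
    intro out
    show pvFin (pvPairsFold t (out ++ [pvSh b 1, pvSh a (-1)], none)) = _
    rw [ih]
    simp [pvGB]

theorem pv_GB_eq_G : ∀ (l : List Char), (∀ c ∈ l, c.toNat ≤ 126) → pvGB l = pvG l := by
  intro l
  induction l using pvG.induct with
  | case1 => intro _; rfl
  | case2 a => intro h; simp [pvGB, pvG, pv_sh_plus a (h a (by simp))]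
  | case3 a b t ih =>
    intro h
    simp only [pvGB, pvG, pv_sh_plus b (h b (by simp)), pv_sh_minus a (h a (by simp))]
    rw [ih (fun c hc => h c (by simp [hc]))]

-- ===== VERDICT (by name: the statement is the Claim_ definition above) =====
theorem custom_encrypt_spec : Claim_equal_custom_encrypt := by
  intro text hdom
  show custom_encrypt text = custom_encrypt_alt text
  unfold custom_encrypt custom_encrypt_alt
  rw [pv_B_fold text.toList 0 [] [] none]
  rw [Prod.mk.injEq]
  refine ⟨?_, rfl⟩
  apply congrArg String.ofList
  rw [pv_replace_filter]
  rw [pv_A_fold (text.toList.filter (fun c => c ≠ ' ')) 0 []]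
  rw [pv_finalize]
  have h126 : ∀ c ∈ text.toList.filter (fun c => c ≠ ' '), c.toNat ≤ 126 := by
    intro c hc
    have hct : c ∈ text.toList := List.mem_of_mem_filter hc
    unfold Dom_custom_encrypt pvDomStr at hdom
    rw [List.all_eq_true] at hdom
    have hch := hdom c hct
    simp [pvDomChar] at hch
    omega
  rw [pv_GB_eq_G _ h126]
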